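-- pv_equiv track=rewrite | github.com/dreezy-6/ADAAD | tools/asset_generator.py | estimate_foreground_rgb
-- ===== SOURCE A (Python) =====
-- from typing import Any, Dict, List, Optional, Tuple
--
-- def estimate_foreground_rgb(
--     samples: List[Tuple[int, int, int, int]],
--     alpha_min: int = 10,
-- ) -> Optional[Tuple[int, int, int]]:
--     """
--     Estimate the average foreground color from non-transparent pixels.
--     """
--     r_sum = g_sum = b_sum = count = 0
--     for r, g, b, a in samples:
--         if a < alpha_min:
--             continue
--         r_sum += r
--         g_sum += g
--         b_sum += b
--         count += 1
--     if count == 0: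
--         return None
--     return (r_sum // count, g_sum // count, b_sum // count)
-- ===== SOURCE B (Python) =====
-- def estimate_foreground_rgb(samples, alpha_min=10):
--     def sums(lo, hi):
--         # (r_sum, g_sum, b_sum, count) of foreground pixels in samples[lo:hi],
--         # computed by divide and conquer on the index range.
--         if hi - lo == 0:
--             return (0, 0, 0, 0)
--         if hi - lo == 1:
--             r, g, b, a = samples[lo]
--             return (r, g, b, 1) if a >= alpha_min else (0, 0, 0, 0)
--         mid = (lo + hi) // 2
--         lr, lg, lb, lc = sums(lo, mid)
--         rr, rg, rb, rc = sums(mid, hi)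
--         return (lr + rr, lg + rg, lb + rb, lc + rc)
--
--     r, g, b, c = sums(0, len(samples))
--     if c == 0:
--         return None
--     return (r // c, g // c, b // c)
-- ===== Notes on version B (the rewrite author's own statement) =====
-- stated objective: alternative
-- what changed: Replaces A's single left-to-right accumulation loop with a divide-and-conquer recursion that splits the sample range in half, computes channel sums and counts of each half recursively, and combines them; correctness relies on associativity/commutativity of integer addition.
import Mathlib
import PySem

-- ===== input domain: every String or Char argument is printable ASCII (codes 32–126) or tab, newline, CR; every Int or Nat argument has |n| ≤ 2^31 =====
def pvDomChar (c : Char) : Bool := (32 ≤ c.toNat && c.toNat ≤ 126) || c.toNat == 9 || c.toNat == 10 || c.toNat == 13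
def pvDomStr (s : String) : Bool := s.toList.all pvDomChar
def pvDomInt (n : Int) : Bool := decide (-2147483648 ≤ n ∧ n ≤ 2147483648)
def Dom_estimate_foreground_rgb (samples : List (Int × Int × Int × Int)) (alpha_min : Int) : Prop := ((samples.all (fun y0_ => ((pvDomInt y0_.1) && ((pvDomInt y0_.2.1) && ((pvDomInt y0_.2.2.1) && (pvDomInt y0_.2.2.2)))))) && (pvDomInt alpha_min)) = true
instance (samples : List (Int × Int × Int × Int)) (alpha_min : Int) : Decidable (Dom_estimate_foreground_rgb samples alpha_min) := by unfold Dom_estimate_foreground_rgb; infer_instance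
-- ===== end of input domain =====

-- B replaces A's single accumulation loop with a divide-and-conquer recursion summing channel totals of each half; same O(n) cost, different algorithmic structure.


-- ===== PORT A =====
-- literal port: one loop accumulating r_sum, g_sum, b_sum, count; skip pixels with a < alpha_min
def estimate_foreground_rgb (samples : List (Int × Int × Int × Int)) (alpha_min : Int) : Option (Int × Int × Int) :=
  let st := samples.foldl
    (fun (st : Int × Int × Int × Int) p =>
      if p.2.2.2 < alpha_min then st
      else (st.1 + p.1, st.2.1 + p.2.1, st.2.2.1 + p.2.2.1, st.2.2.2 + 1))
    (0, 0, 0, 0)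
  if st.2.2.2 = 0 then none
  else some (PySem.Int.floordiv st.1 st.2.2.2, PySem.Int.floordiv st.2.1 st.2.2.2,
             PySem.Int.floordiv st.2.2.1 st.2.2.2)

-- ===== PORT B =====
-- Source B's helper sums(lo, hi): divide-and-conquer on the range samples[lo:hi].
-- Ported as recursion on the sublist itself (Python's lo/hi pair denotes exactly this
-- sublist; its split point mid=(lo+hi)//2 is the sublist's half length).
def efr_sums (alpha_min : Int) : List (Int × Int × Int × Int) → Int × Int × Int × Int
  | [] => (0, 0, 0, 0)
  | [p] => if alpha_min ≤ p.2.2.2 then (p.1, p.2.1, p.2.2.1, 1) else (0, 0, 0, 0)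
  | p :: q :: rest =>
    let xs := p :: q :: rest
    let mid := xs.length / 2
    let l := efr_sums alpha_min (xs.take mid)
    let r := efr_sums alpha_min (xs.drop mid)
    (l.1 + r.1, l.2.1 + r.2.1, l.2.2.1 + r.2.2.1, l.2.2.2 + r.2.2.2)
termination_by xs => xs.length
decreasing_by
  all_goals simp [List.length_take, List.length_drop]; omega

-- literal port of Source B: divide-and-conquer channel sums, then the empty-count guard
def estimate_foreground_rgb_alt (samples : List (Int × Int × Int × Int)) (alpha_min : Int) : Option (Int × Int × Int) :=
  let s := efr_sums alpha_min samples
  if s.2.2.2 = 0 then none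
  else some (PySem.Int.floordiv s.1 s.2.2.2, PySem.Int.floordiv s.2.1 s.2.2.2,
             PySem.Int.floordiv s.2.2.1 s.2.2.2)

-- ===== PRECONDITION & SPEC =====
def Spec_estimate_foreground_rgb (samples : List (Int × Int × Int × Int)) (alpha_min : Int) (out : Option (Int × Int × Int)) : Prop := out = estimate_foreground_rgb_alt samples alpha_min
instance (samples : List (Int × Int × Int × Int)) (alpha_min : Int) (out : Option (Int × Int × Int)) : Decidable (Spec_estimate_foreground_rgb samples alpha_min out) := by unfold Spec_estimate_foreground_rgb; infer_instance

-- ===== CLAIM (what is proved, stated in full; the proofs are below) =====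
def Claim_equal_estimate_foreground_rgb : Prop := ∀ (samples : List (Int × Int × Int × Int)) (alpha_min : Int), Dom_estimate_foreground_rgb samples alpha_min → Spec_estimate_foreground_rgb samples alpha_min (estimate_foreground_rgb samples alpha_min)

-- ===== LEMMAS AND PROOFS =====

-- the common target: channel sums and count of the alpha-filtered list
def efr_spec (alpha_min : Int) (xs : List (Int × Int × Int × Int)) : Int × Int × Int × Int :=
  (((xs.filter (fun p => alpha_min ≤ p.2.2.2)).map (·.1)).sum,
   ((xs.filter (fun p => alpha_min ≤ p.2.2.2)).map (·.2.1)).sum,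
   ((xs.filter (fun p => alpha_min ≤ p.2.2.2)).map (·.2.2.1)).sum,
   ((xs.filter (fun p => alpha_min ≤ p.2.2.2)).length : Int))

theorem efr_spec_append (alpha_min : Int) (xs ys : List (Int × Int × Int × Int)) :
    efr_spec alpha_min (xs ++ ys)
      = ((efr_spec alpha_min xs).1 + (efr_spec alpha_min ys).1,
         (efr_spec alpha_min xs).2.1 + (efr_spec alpha_min ys).2.1,
         (efr_spec alpha_min xs).2.2.1 + (efr_spec alpha_min ys).2.2.1,
         (efr_spec alpha_min xs).2.2.2 + (efr_spec alpha_min ys).2.2.2) := by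
  simp [efr_spec]

-- B's divide-and-conquer computes exactly the filtered channel sums and count
theorem efr_sums_eq (alpha_min : Int) (xs : List (Int × Int × Int × Int)) :
    efr_sums alpha_min xs = efr_spec alpha_min xs := by
  fun_induction efr_sums alpha_min xs with
  | case1 => simp [efr_spec]
  | case2 p h => simp [efr_spec, h]
  | case3 p h => simp [efr_spec, h]
  | case4 p q rest xs mid l r ih1 ih2 =>
    simp only [l, r, ih1, ih2, xs, mid]
    have h2 := efr_spec_append alpha_min
      ((p :: q :: rest).take ((p :: q :: rest).length / 2))
      ((p :: q :: rest).drop ((p :: q :: rest).length / 2))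
    rw [List.take_append_drop] at h2
    rw [h2]

-- A's accumulation loop also computes the filtered channel sums and count
theorem efr_fold_eq (alpha_min : Int) (samples : List (Int × Int × Int × Int))
    (st : Int × Int × Int × Int) :
    samples.foldl
      (fun (st : Int × Int × Int × Int) p =>
        if p.2.2.2 < alpha_min then st
        else (st.1 + p.1, st.2.1 + p.2.1, st.2.2.1 + p.2.2.1, st.2.2.2 + 1)) st
    = (st.1 + (efr_spec alpha_min samples).1,
       st.2.1 + (efr_spec alpha_min samples).2.1,
       st.2.2.1 + (efr_spec alpha_min samples).2.2.1,
       st.2.2.2 + (efr_spec alpha_min samples).2.2.2) := by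
  induction samples generalizing st with
  | nil => simp [efr_spec]
  | cons p tl ih =>
    by_cases h : p.2.2.2 < alpha_min
    · simp only [List.foldl_cons, if_pos h]
      rw [ih]
      simp [efr_spec, not_le.mpr h]
    · simp only [List.foldl_cons, if_neg h]
      rw [ih]
      simp [efr_spec, not_lt.mp h]
      refine ⟨by ring, by ring, by ring, by ring⟩

-- ===== VERDICT (by name: the statement is the Claim_ definition above) =====
theorem estimate_foreground_rgb_spec : Claim_equal_estimate_foreground_rgb := by
  intro samples alpha_min _
  unfold Spec_estimate_foreground_rgb estimate_foreground_rgb estimate_foreground_rgb_alt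
  simp only [efr_fold_eq, efr_sums_eq, zero_add]
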